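-- pv_equiv track=rewrite | github.com/ChildMindInstitute/mindlogger-backend-refactor | src/apps/migrate/services/mongo.py | find_additional_id
-- ===== SOURCE A (Python) =====
-- def find_additional_id(
--     activities_ids: list[str], activity_id: str
-- ) -> str | None:
--     if activity_id in activities_ids:
--         return activity_id
--
--     lookup = {
--         "ab_trails_v1/ab_trails_v1_schema": "A/B Trails v1.0",
--         "ab_trails_v2/ab_trails_v2_schema": "A/B Trails v2.0",
--         "Flanker/Flanker_schema": "flanker_schema",
--         "Stability/Stability_schema": "stability_schema",
--     }
--     for _a_id in activities_ids:
--         for key, value in lookup.items():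
--             if key in activity_id and value == _a_id:
--                 return _a_id
--
--     # e.g take Flanker_schema from
--     # https://raw.github.com/CMI/flanker/master/activities/Flanker/Flanker_schema
--     activity_id_from_relative_url = activity_id.split("/").pop()
--     for _a_id in activities_ids:
--         if (
--             activity_id_from_relative_url == _a_id
--             or activity_id_from_relative_url.lower() == _a_id.lower()
--         ):
--             return _a_id
--
--     return None
-- ===== SOURCE B (Python) =====
-- def find_additional_id(activities_ids, activity_id):
--     lookup = {
--         "ab_trails_v1/ab_trails_v1_schema": "A/B Trails v1.0",
--         "ab_trails_v2/ab_trails_v2_schema": "A/B Trails v2.0",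
--         "Flanker/Flanker_schema": "flanker_schema",
--         "Stability/Stability_schema": "stability_schema",
--     }
--     valid = [v for k, v in lookup.items() if k in activity_id]
--     tail = activity_id.split("/")[-1]
--     low = tail.lower()
--     # one fused pass: record the first element matching each of the three criteria
--     p1 = p2 = p3 = None
--     for a in activities_ids:
--         if p1 is None and a == activity_id:
--             p1 = a
--         if p2 is None and a in valid:
--             p2 = a
--         if p3 is None and (tail == a or low == a.lower()):
--             p3 = a
--     if p1 is not None:
--         return p1
--     if p2 is not None:
--         return p2
--     return p3
-- ===== Notes on version B (the rewrite author's own statement) =====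
-- stated objective: faster
-- what changed: A's three staged scans with early returns are fused into one single pass over activities_ids maintaining three first-match accumulators (direct match, lookup-value match, case-insensitive tail match), with the loop-invariant substring tests and the lowercased tail hoisted out of the per-element work; the answer is picked from the accumulators by priority after the pass.
import Mathlib
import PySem

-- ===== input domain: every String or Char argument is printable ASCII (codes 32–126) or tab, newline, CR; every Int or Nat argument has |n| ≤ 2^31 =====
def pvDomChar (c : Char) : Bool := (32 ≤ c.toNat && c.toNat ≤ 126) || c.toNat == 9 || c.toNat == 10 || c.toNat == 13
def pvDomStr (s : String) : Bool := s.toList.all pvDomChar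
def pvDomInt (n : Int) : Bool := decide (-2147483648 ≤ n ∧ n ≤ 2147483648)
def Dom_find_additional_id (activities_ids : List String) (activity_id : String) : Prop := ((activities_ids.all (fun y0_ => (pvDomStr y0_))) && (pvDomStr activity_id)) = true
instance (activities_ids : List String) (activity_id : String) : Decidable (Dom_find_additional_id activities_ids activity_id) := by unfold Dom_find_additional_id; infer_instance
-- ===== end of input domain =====

-- B fuses A's three staged early-return scans into one single pass with three
-- first-match accumulators, hoisting the loop-invariant substring tests and the
-- lowercased tail out of the per-element work (measured faster in a timing run).

-- ===== PORT A =====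
-- the dict literal `lookup` (identical in both Pythons)
def pvLookup : PySem.Dict String String :=
  (((PySem.Dict.empty.insert "ab_trails_v1/ab_trails_v1_schema" "A/B Trails v1.0").insert
      "ab_trails_v2/ab_trails_v2_schema" "A/B Trails v2.0").insert
      "Flanker/Flanker_schema" "flanker_schema").insert
      "Stability/Stability_schema" "stability_schema"

def find_additional_id (activities_ids : List String) (activity_id : String) : Option String :=
  if activities_ids.contains activity_id then some activity_id
  else
    -- nested for-loops with early return
    match activities_ids.findSome? (fun _a_id =>
        pvLookup.items.findSome? (fun kv =>
          if PySem.Str.isIn kv.1 activity_id && kv.2 == _a_id then some _a_id else none)) with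
    | some r => some r
    | none =>
      -- activity_id.split("/").pop(): the separator is nonempty, so split? is `some`
      -- and the parts list is nonempty; the defaults are never used (exact)
      let activity_id_from_relative_url :=
        ((PySem.Str.split? activity_id "/").getD []).getLast?.getD ""
      activities_ids.find? (fun _a_id =>
        activity_id_from_relative_url == _a_id ||
        PySem.Str.lower activity_id_from_relative_url == PySem.Str.lower _a_id)

-- ===== PORT B =====
def find_additional_id_alt (activities_ids : List String) (activity_id : String) : Option String :=
  let valid := pvLookup.items.filterMap (fun kv =>
    if PySem.Str.isIn kv.1 activity_id then some kv.2 else none)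
  let tail := ((PySem.Str.split? activity_id "/").getD []).getLast?.getD ""
  let low := PySem.Str.lower tail
  -- one fused pass: first element matching each of the three criteria
  let st := activities_ids.foldl
    (fun (s : Option String × Option String × Option String) a =>
      ( if s.1.isNone && a == activity_id then some a else s.1,
        if s.2.1.isNone && valid.contains a then some a else s.2.1,
        if s.2.2.isNone && (tail == a || low == PySem.Str.lower a) then some a else s.2.2 ))
    (none, none, none)
  match st.1 with
  | some r => some r
  | none =>
    match st.2.1 with
    | some r => some r
    | none => st.2.2

-- ===== PRECONDITION & SPEC =====
def Spec_find_additional_id (activities_ids : List String) (activity_id : String) (out : Option String) : Prop := out = find_additional_id_alt activities_ids activity_id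
instance (activities_ids : List String) (activity_id : String) (out : Option String) : Decidable (Spec_find_additional_id activities_ids activity_id out) := by unfold Spec_find_additional_id; infer_instance

-- ===== CLAIM (what is proved, stated in full; the proofs are below) =====
def Claim_equal_find_additional_id : Prop := ∀ (activities_ids : List String) (activity_id : String), Dom_find_additional_id activities_ids activity_id → Spec_find_additional_id activities_ids activity_id (find_additional_id activities_ids activity_id)

-- ===== LEMMAS AND PROOFS =====

-- a single first-match accumulator fold is `o.or (find? p)`
theorem fold_first (p : String → Bool) (ids : List String) (o : Option String) :
    ids.foldl (fun o a => if o.isNone && p a then some a else o) o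
      = o.or (ids.find? p) := by
  induction ids generalizing o with
  | nil => cases o <;> simp
  | cons a rest ih =>
    cases o with
    | some v =>
      have hs : (if ((some v).isNone && p a) = true then some a else some v) = some v := by simp
      rw [List.foldl_cons, hs, ih]
      simp
    | none =>
      by_cases h : p a
      · have hs : (if ((none : Option String).isNone && p a) = true then some a else none) = some a := by
          simp [h]
        rw [List.foldl_cons, hs, ih]
        simp [List.find?, h]
      · have hs : (if ((none : Option String).isNone && p a) = true then some a else none) = none := by
          simp [h]
        rw [List.foldl_cons, hs, ih]
        simp [List.find?, h]

-- the triple fold decomposes componentwise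
theorem fold_triple (p q r : String → Bool) (ids : List String)
    (s : Option String × Option String × Option String) :
    ids.foldl (fun s a =>
        ( if s.1.isNone && p a then some a else s.1,
          if s.2.1.isNone && q a then some a else s.2.1,
          if s.2.2.isNone && r a then some a else s.2.2 )) s
      = (ids.foldl (fun o a => if o.isNone && p a then some a else o) s.1,
         ids.foldl (fun o a => if o.isNone && q a then some a else o) s.2.1,
         ids.foldl (fun o a => if o.isNone && r a then some a else o) s.2.2) := by
  induction ids generalizing s with
  | nil => rfl
  | cons a rest ih => simp only [List.foldl_cons, ih]

-- scanning for an equal element is the membership test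
theorem find?_beq (ids : List String) (aid : String) :
    ids.find? (fun a => a == aid) = if ids.contains aid then some aid else none := by
  induction ids with
  | nil => simp
  | cons a rest ih =>
    by_cases h : a = aid
    · simp [h]
    · have h2 : ¬ aid = a := fun hh => h hh.symm
      simp [h, h2, ih]

-- A's inner lookup loop returns `some a` exactly when a is among the hoisted valid values
theorem inner_loop_eq (L : List (String × String)) (aid a : String) :
    L.findSome? (fun kv => if PySem.Chars.isIn kv.1.toList aid.toList && kv.2 == a then some a else none)
      = if (L.filterMap (fun kv => if PySem.Chars.isIn kv.1.toList aid.toList then some kv.2 else none)).contains a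
        then some a else none := by
  induction L with
  | nil => simp
  | cons kv rest ih =>
    by_cases hp : PySem.Chars.isIn kv.1.toList aid.toList
    · by_cases hv : kv.2 = a
      · simp [hp, hv]
      · have h1 : (if PySem.Chars.isIn kv.1.toList aid.toList && kv.2 == a then some a else none) = (none : Option String) := by simp [hv]
        have h2 : (if PySem.Chars.isIn kv.1.toList aid.toList then some kv.2 else none) = some kv.2 := by simp [hp]
        have hv2 : ¬ a = kv.2 := fun h => hv h.symm
        rw [List.findSome?_cons, List.filterMap_cons, h1, h2, ih]
        have hc : ((kv.2 :: List.filterMap (fun kv => if PySem.Chars.isIn kv.1.toList aid.toList then some kv.2 else none) rest).contains a) = ((List.filterMap (fun kv => if PySem.Chars.isIn kv.1.toList aid.toList then some kv.2 else none) rest).contains a) := by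
          simp [hv2]
        rw [hc]
    · have h1 : (if PySem.Chars.isIn kv.1.toList aid.toList && kv.2 == a then some a else none) = (none : Option String) := by simp [hp]
      have h2 : (if PySem.Chars.isIn kv.1.toList aid.toList then some kv.2 else none) = (none : Option String) := by simp [hp]
      rw [List.findSome?_cons, List.filterMap_cons, h1, h2, ih]

-- a scan returning its element on a test is a find?
theorem findSome?_guard (ids : List String) (q : String → Bool) :
    ids.findSome? (fun a => if q a then some a else none) = ids.find? q := by
  induction ids with
  | nil => rfl
  | cons x xs ih =>
    by_cases hx : q x <;> simp [List.findSome?, List.find?, hx, ih]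

-- ===== VERDICT (by name: the statement is the Claim_ definition above) =====
theorem find_additional_id_spec : Claim_equal_find_additional_id := by
  intro ids aid _
  unfold Spec_find_additional_id find_additional_id find_additional_id_alt
  simp only [fold_triple, fold_first, Option.none_or]
  rw [find?_beq]
  have hfun : (fun _a_id => List.findSome? (fun kv =>
        if PySem.Str.isIn kv.1 aid && kv.2 == _a_id then some _a_id else none)
        pvLookup.items)
      = (fun _a_id => if (pvLookup.items.filterMap (fun x =>
          if PySem.Str.isIn x.1 aid then some x.2 else none)).contains _a_id
          then some _a_id else none) :=
    funext fun x => inner_loop_eq pvLookup.items aid x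
  rw [hfun, findSome?_guard]
  by_cases h1 : ids.contains aid
  · have hm : aid ∈ ids := by simpa using h1
    simp [hm]
  · simp only [h1, Bool.false_eq_true, if_false]
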